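-- pv_equiv track=rewrite | github.com/ElianaHarriet/TDA | dinamica.py | mesa_w
-- ===== SOURCE A (Python) =====
-- def mesa_w(w, grupos):
--     ocupados, sum_ocupados = [], 0
--     ocupados_ant, sum_ocupados_ant = [], 0
--
--     for i in range(len(grupos)):
--         cant_integrantes = grupos[i]
--         if cant_integrantes > w:
--             continue
--
--         if sum_ocupados + cant_integrantes <= w:
--             ocupados.append(cant_integrantes)
--             sum_ocupados += cant_integrantes
--             continue
--
--         # opción 1 -> tenerlo en cuenta
--         opcion1, sum_opcion1 = [cant_integrantes], cant_integrantes
--         if sum_ocupados_ant + cant_integrantes <= w: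
--             opcion1 = ocupados_ant + [cant_integrantes]
--             sum_opcion1 = sum_ocupados_ant + cant_integrantes
--
--         # opción 2 -> no tenerlo en cuenta
--         opcion2, sum_opcion2 = ocupados, sum_ocupados
--
--         # me quedo con el que maximice
--         ocupados_ant, sum_ocupados_ant = ocupados[:], sum_ocupados
--         ocupados, sum_ocupados = opcion1, sum_opcion1
--         if sum_opcion1 < sum_opcion2:
--             ocupados, sum_ocupados = opcion2, sum_opcion2
--
--     return ocupados
-- ===== SOURCE B (Python) =====
-- def mesa_w(w, grupos):
--     # Two staged passes: a numeric forward pass over sums only, recording a decision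
--     # code per accepted group (0=append, 1=keep current, 2=extend previous, 3=restart),
--     # then a backward trace over the decision tape that emits the chosen groups once.
--     tape = []            # (group, code) for every group that was not skipped
--     s, sa = 0, 0         # sums of the current and the previous candidate seating
--     for g in grupos:
--         if g > w:
--             continue
--         if s + g <= w:
--             tape.append((g, 0))
--             s += g
--         else:
--             fits = sa + g <= w
--             s1 = sa + g if fits else g
--             if s1 < s:
--                 tape.append((g, 1))
--                 sa = s
--             else:
--                 tape.append((g, 2 if fits else 3))
--                 s, sa = s1, s
--     # backward reconstruction of the final current seating
--     out = []
--     tracing_current = True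
--     for g, code in reversed(tape):
--         if tracing_current:
--             if code == 0:
--                 out.append(g)
--             elif code == 2:
--                 out.append(g)
--                 tracing_current = False
--             elif code == 3:
--                 out.append(g)
--                 break
--             # code == 1: current unchanged, keep tracing it
--         else:
--             if code != 0:
--                 tracing_current = True   # previous was a snapshot of current
--     out.reverse()
--     return out
-- ===== Notes on version B (the rewrite author's own statement) =====
-- stated objective: alternative
-- what changed: B never builds lists inside the loop: a numeric forward pass over the running sums records one decision code per group (append/keep/extend-previous/restart), and a single backward trace over that decision tape reconstructs the chosen seating, instead of A's per-step list copies and concatenations.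
import Mathlib
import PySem

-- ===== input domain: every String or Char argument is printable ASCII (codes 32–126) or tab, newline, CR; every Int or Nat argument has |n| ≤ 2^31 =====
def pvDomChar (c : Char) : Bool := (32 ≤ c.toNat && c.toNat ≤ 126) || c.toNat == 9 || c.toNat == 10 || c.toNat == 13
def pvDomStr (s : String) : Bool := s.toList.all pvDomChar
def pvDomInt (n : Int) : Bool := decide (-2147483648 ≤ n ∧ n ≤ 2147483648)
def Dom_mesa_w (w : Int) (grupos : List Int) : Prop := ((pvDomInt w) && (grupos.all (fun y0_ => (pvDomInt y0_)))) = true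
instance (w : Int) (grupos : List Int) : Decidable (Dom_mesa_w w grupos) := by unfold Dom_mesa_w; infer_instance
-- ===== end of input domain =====

-- B replaces A's in-loop list building (copies/concatenations of the two candidate
-- seatings) with a numeric forward pass recording a decision code per group,
-- followed by a backward trace of the tape that reconstructs the result once.

-- ===== PORT A =====
-- state: (ocupados, sum_ocupados, ocupados_ant, sum_ocupados_ant)
def mesaStepA (w : Int) (st : List Int × Int × List Int × Int) (g : Int) :
    List Int × Int × List Int × Int :=
  let (oc, s, ant, sant) := st
  if g > w then st
  else if s + g ≤ w then (oc ++ [g], s + g, ant, sant)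
  else
    -- opción 1
    let op : List Int × Int := if sant + g ≤ w then (ant ++ [g], sant + g) else ([g], g)
    -- ocupados_ant := ocupados[:]; then keep opción 2 if sum_opcion1 < sum_opcion2
    if op.2 < s then (oc, s, oc, s) else (op.1, op.2, oc, s)

def mesa_w (w : Int) (grupos : List Int) : List Int :=
  (grupos.foldl (mesaStepA w) ([], 0, [], 0)).1

-- ===== PORT B =====
-- forward pass of Source B: state (tape, s, sa); the tape is appended to, as in Python
def mesaStepB (w : Int) (st : List (Int × Int) × Int × Int) (g : Int) :
    List (Int × Int) × Int × Int :=
  let (tape, s, sa) := st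
  if g > w then st
  else if s + g ≤ w then (tape ++ [(g, 0)], s + g, sa)
  else
    let s1 : Int := if sa + g ≤ w then sa + g else g
    if s1 < s then (tape ++ [(g, 1)], s, s)
    else (tape ++ [(g, if sa + g ≤ w then 2 else 3)], s1, s)

-- backward trace of Source B (`for g, code in reversed(tape)`): run on tape.reverse;
-- the Bool is `tracing_current`; emissions are collected front-to-back and reversed at the end
def mesaRecon : List (Int × Int) → Bool → List Int
  | [], _ => []
  | (g, c) :: rest, true =>
    if c = 0 then g :: mesaRecon rest true
    else if c = 1 then mesaRecon rest true
    else if c = 2 then g :: mesaRecon rest false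
    else [g]
  | (_, c) :: rest, false =>
    if c = 0 then mesaRecon rest false else mesaRecon rest true

def mesa_w_alt (w : Int) (grupos : List Int) : List Int :=
  (mesaRecon ((grupos.foldl (mesaStepB w) ([], 0, 0)).1).reverse true).reverse

-- ===== PRECONDITION & SPEC =====
def Spec_mesa_w (w : Int) (grupos : List Int) (out : List Int) : Prop := out = mesa_w_alt w grupos
instance (w : Int) (grupos : List Int) (out : List Int) : Decidable (Spec_mesa_w w grupos out) := by unfold Spec_mesa_w; infer_instance

-- ===== CLAIM (what is proved, stated in full; the proofs are below) =====
def Claim_equal_mesa_w : Prop := ∀ (w : Int) (grupos : List Int), Dom_mesa_w w grupos → Spec_mesa_w w grupos (mesa_w w grupos)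

-- ===== LEMMAS AND PROOFS =====

-- invariant: tracing B's tape backwards rebuilds A's two lists (reversed), while
-- the numeric components of the two folds coincide
lemma mesa_inv (w : Int) :
    ∀ (gs : List Int) (oc ant : List Int) (s sant : Int) (tape : List (Int × Int)),
      mesaRecon tape.reverse true = oc.reverse →
      mesaRecon tape.reverse false = ant.reverse →
      mesaRecon ((gs.foldl (mesaStepB w) (tape, s, sant)).1).reverse true
        = (gs.foldl (mesaStepA w) (oc, s, ant, sant)).1.reverse := by
  intro gs
  induction gs with
  | nil => intro oc ant s sant tape h1 _; simpa using h1
  | cons g rest ih =>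
    intro oc ant s sant tape h1 h2
    simp only [List.foldl_cons, mesaStepA, mesaStepB]
    split_ifs with hgw hfit hext hlt hlt
    · exact ih oc ant s sant tape h1 h2
    · -- append branch, code 0
      refine ih (oc ++ [g]) ant (s + g) sant (tape ++ [(g, 0)]) ?_ ?_ <;>
        simp [mesaRecon, h1, h2]
    · -- overflow, opción1 from ant fits, but opción2 wins (code 1)
      refine ih oc oc s s (tape ++ [(g, 1)]) ?_ ?_ <;>
        simp [mesaRecon, h1]
    · -- overflow, take ant ++ [g] (code 2)
      refine ih (ant ++ [g]) oc (sant + g) s (tape ++ [(g, 2)]) ?_ ?_ <;>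
        simp [mesaRecon, h1, h2]
    · -- overflow, restart would lose (code 1)
      refine ih oc oc s s (tape ++ [(g, 1)]) ?_ ?_ <;>
        simp [mesaRecon, h1]
    · -- overflow, restart with [g] (code 3)
      refine ih [g] oc g s (tape ++ [(g, 3)]) ?_ ?_ <;>
        simp [mesaRecon, h1]

-- ===== VERDICT (by name: the statement is the Claim_ definition above) =====
theorem mesa_w_spec : Claim_equal_mesa_w := by
  intro w grupos _
  unfold Spec_mesa_w mesa_w mesa_w_alt
  have h := mesa_inv w grupos [] [] 0 0 [] (by simp [mesaRecon]) (by simp [mesaRecon])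
  rw [h]
  simp
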